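-- pv_equiv track=rewrite | github.com/spiri4/phytonjangogame | game/logic.py | find_removable_pair
-- ===== SOURCE A (Python) =====
-- from itertools import combinations
--
-- def check_nearest_index(clicked: list, index1: int, index2: int) -> bool:
--     """True if indices are adjacent or connected by disabled cells only."""
--     if index2 - index1 == 1 or (index2 - index1) / 9 == 1:
--         return True
--     if (index2 - index1) % 9 == 0:  # same column
--         for k in range(index1 + 9, index2, 9):
--             if clicked[k] != '2':
--                 return False
--         return True
--     # same row
--     for p in range(index1 + 1, index2, 1):
--         if clicked[p] != '2':
--             return False
--     return True
--
-- def find_removable_pair(texts: list, clicked: list) -> list: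
--     """Return [i, j] if a valid pair exists, else []."""
--     active = [i for i in range(len(clicked)) if clicked[i] != '2']
--     for i_idx, j_idx in combinations(active, 2):
--         try:
--             vi = int(texts[i_idx])
--             vj = int(texts[j_idx])
--         except (ValueError, IndexError):
--             continue
--         if (vi == vj or vi + vj == 10) and check_nearest_index(clicked, i_idx, j_idx):
--             return [i_idx, j_idx]
--     return []
-- ===== SOURCE B (Python) =====
-- def find_removable_pair(texts: list, clicked: list) -> list:
--     """Return [i, j] if a valid pair exists, else [].
--
--     One left-to-right pass: for each active cell i, the only geometrically
--     removable partners are (a) the next active cell and (b) the first active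
--     cell in i's column (index = i mod 9) with no active column cell between,
--     so at most two candidates are value-checked per cell.
--     """
--     active = [i for i in range(len(clicked)) if clicked[i] != '2']
--
--     def value(i):
--         try:
--             return int(texts[i])
--         except (ValueError, IndexError):
--             return None
--
--     for k in range(len(active) - 1):
--         i = active[k]
--         vi = value(i)
--         if vi is None:
--             continue
--         cands = [active[k + 1]]
--         for m in range(k + 1, len(active)):
--             if (active[m] - i) % 9 == 0:
--                 if m > k + 1:
--                     cands.append(active[m])
--                 break
--         for j in cands:
--             vj = value(j)
--             if vj is not None and (vi == vj or vi + vj == 10):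
--                 return [i, j]
--     return []
-- ===== Notes on version B (the rewrite author's own statement) =====
-- stated objective: faster
-- what changed: Instead of value-checking every pair of active cells (with an O(n) adjacency scan per pair), B walks the active cells once and value-checks only the at-most-two geometrically removable partners of each cell: the next active cell and the first same-column active cell.
import Mathlib
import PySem

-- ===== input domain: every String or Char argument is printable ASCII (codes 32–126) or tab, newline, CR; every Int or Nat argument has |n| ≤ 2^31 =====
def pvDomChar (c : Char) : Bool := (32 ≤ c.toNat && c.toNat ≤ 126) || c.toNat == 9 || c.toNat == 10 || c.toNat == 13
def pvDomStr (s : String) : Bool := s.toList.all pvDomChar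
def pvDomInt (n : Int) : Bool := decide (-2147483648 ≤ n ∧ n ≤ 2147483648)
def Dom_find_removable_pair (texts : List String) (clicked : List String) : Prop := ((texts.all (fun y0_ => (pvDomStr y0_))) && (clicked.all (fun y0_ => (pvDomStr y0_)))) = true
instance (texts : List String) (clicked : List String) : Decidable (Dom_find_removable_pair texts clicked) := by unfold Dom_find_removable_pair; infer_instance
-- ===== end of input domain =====

-- B replaces A's scan of all active pairs (each with a linear adjacency walk) by one
-- left-to-right pass that value-checks only the ≤ 2 geometrically removable partners
-- of each active cell; objective: faster (asymptotic).

-- shared helpers (both Python versions contain these lines verbatim):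
-- active = [i for i in range(len(clicked)) if clicked[i] != '2']
def pvActive (clicked : List String) : List Nat :=
  (List.range clicked.length).filter (fun i => clicked.getD i "" != "2")

-- try: int(texts[i]) except (ValueError, IndexError) — none means the pair is skipped
def pvVal (texts : List String) (i : Nat) : Option Int :=
  (PySem.List.pyGet? texts (i : Int)).bind PySem.Int.ofStr?

-- ===== PORT A =====
-- check_nearest_index; Python only calls it with i < j < len(clicked).
-- '(index2 - index1) / 9 == 1' (true division) holds exactly when j - i == 9.
-- range(i+9, j, 9) and range(i+1, j) are rendered as List.range' with their exact
-- Python lengths ((j-i-1)/9 and j-i-1, Nat subtraction/division); the early-return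
-- False loop is List.all.
def check_nearest_index (clicked : List String) (i j : Nat) : Bool :=
  if j - i == 1 || j - i == 9 then true
  else if (j - i) % 9 == 0 then
    (List.range' (i + 9) ((j - i - 1) / 9) 9).all (fun k => clicked.getD k "" == "2")
  else
    (List.range' (i + 1) (j - i - 1) 1).all (fun p => clicked.getD p "" == "2")

-- body of A's pair loop: try-parse both values, test value match and adjacency
def pvTryPair (texts : List String) (clicked : List String) (i j : Nat) : Option (List Int) :=
  match pvVal texts i, pvVal texts j with
  | some vi, some vj =>
      if (vi == vj || vi + vj == 10) && check_nearest_index clicked i j then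
        some [(i : Int), (j : Int)]
      else none
  | _, _ => none

-- for i_idx, j_idx in combinations(active, 2): lexicographic pair loop with first-hit return
def pvLoopA (texts : List String) (clicked : List String) : List Nat → List Int
  | [] => []
  | i :: rest =>
    match rest.findSome? (pvTryPair texts clicked i) with
    | some r => r
    | none => pvLoopA texts clicked rest

def find_removable_pair (texts : List String) (clicked : List String) : List Int :=
  pvLoopA texts clicked (pvActive clicked)

-- ===== PORT B =====
-- one pass over the active list: candidates are the next active cell and the first
-- later active cell in the same column (index difference a multiple of 9)
def pvLoopB (texts : List String) (clicked : List String) : List Nat → List Int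
  | [] => []
  | [_] => []
  | i :: j0 :: rest' =>
    match pvVal texts i with
    | none => pvLoopB texts clicked (j0 :: rest')
    | some vi =>
      let cands : List Nat :=
        match (j0 :: rest').find? (fun j => (j - i) % 9 == 0) with
        | some jc => if jc == j0 then [j0] else [j0, jc]
        | none => [j0]
      match cands.findSome? (fun j =>
          match pvVal texts j with
          | some vj => if vi == vj || vi + vj == 10 then some [(i : Int), (j : Int)] else none
          | none => none) with
      | some r => r
      | none => pvLoopB texts clicked (j0 :: rest')

def find_removable_pair_alt (texts : List String) (clicked : List String) : List Int :=
  pvLoopB texts clicked (pvActive clicked)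

-- ===== PRECONDITION & SPEC =====
def Spec_find_removable_pair (texts : List String) (clicked : List String) (out : List Int) : Prop := out = find_removable_pair_alt texts clicked
instance (texts : List String) (clicked : List String) (out : List Int) : Decidable (Spec_find_removable_pair texts clicked out) := by unfold Spec_find_removable_pair; infer_instance

-- ===== CLAIM (what is proved, stated in full; the proofs are below) =====
def Claim_equal_find_removable_pair : Prop := ∀ (texts : List String) (clicked : List String), Dom_find_removable_pair texts clicked → Spec_find_removable_pair texts clicked (find_removable_pair texts clicked)

-- ===== LEMMAS AND PROOFS =====

-- "cell m is active" (not disabled)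
def pvAct (clicked : List String) (m : Nat) : Bool := clicked.getD m "" != "2"

-- invariant of every suffix of the active list: sorted, all members active and in
-- range, complete (every active cell above a member is itself a member)
def pvGood (clicked : List String) (l : List Nat) : Prop :=
  l.Pairwise (· < ·) ∧ (∀ j ∈ l, j < clicked.length ∧ pvAct clicked j = true) ∧
  (∀ x ∈ l, ∀ m, x < m → m < clicked.length → pvAct clicked m = true → m ∈ l)

theorem pvGood_active (clicked : List String) : pvGood clicked (pvActive clicked) := by
  refine ⟨List.Pairwise.filter _ List.pairwise_lt_range, ?_, ?_⟩
  · intro j hj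
    simp only [pvActive, List.mem_filter, List.mem_range] at hj
    exact ⟨hj.1, hj.2⟩
  · intro x hx m h1 h2 h3
    simp only [pvActive, List.mem_filter, List.mem_range]
    exact ⟨h2, h3⟩

theorem pvGood_tail (clicked : List String) (i : Nat) (rest : List Nat)
    (h : pvGood clicked (i :: rest)) : pvGood clicked rest := by
  obtain ⟨hp, hm, hc⟩ := h
  refine ⟨hp.of_cons, fun j hj => hm j (List.mem_cons_of_mem _ hj), ?_⟩
  intro x hx m h1 h2 h3
  have hmm := hc x (List.mem_cons_of_mem _ hx) m h1 h2 h3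
  rcases List.mem_cons.mp hmm with h' | h'
  · exfalso
    have : i < x := (List.pairwise_cons.mp hp).1 x hx
    omega
  · exact h'

-- membership in the two ranges A walks, in arithmetic form
theorem pvMemRange9 (i j m : Nat) :
    m ∈ List.range' (i + 9) ((j - i - 1) / 9) 9 ↔ (i < m ∧ m < j ∧ (m - i) % 9 = 0) := by
  simp only [List.mem_range']
  constructor
  · rintro ⟨k, hk, rfl⟩; omega
  · rintro ⟨h1, h2, h3⟩; exact ⟨(m - i - 9) / 9, by omega, by omega⟩

theorem pvMemRange1 (i j m : Nat) :
    m ∈ List.range' (i + 1) (j - i - 1) 1 ↔ (i < m ∧ m < j) := by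
  simp only [List.mem_range']
  constructor
  · rintro ⟨k, hk, rfl⟩; omega
  · rintro ⟨h1, h2⟩; exact ⟨m - i - 1, by omega, by omega⟩

-- the heart: A's adjacency test, characterised by which cells between i and j are active
theorem pvGeom_iff (clicked : List String) (i j : Nat) (hij : i < j) :
    check_nearest_index clicked i j = true ↔
      ((∀ m, i < m → m < j → pvAct clicked m = false) ∨
       ((j - i) % 9 = 0 ∧ ∀ m, i < m → m < j → (m - i) % 9 = 0 → pvAct clicked m = false)) := by
  have hact : ∀ m, (clicked.getD m "" == "2") = true ↔ pvAct clicked m = false := by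
    intro m; simp [pvAct]
  unfold check_nearest_index
  by_cases h1 : j - i = 1
  · have hb : (j - i == 1 || j - i == 9) = true := by simp [h1]
    simp only [hb, if_true]
    constructor
    · intro _; left; intro m hm1 hm2; omega
    · intro _; trivial
  · by_cases h9 : j - i = 9
    · have hb : (j - i == 1 || j - i == 9) = true := by simp [h9]
      simp only [hb, if_true]
      constructor
      · intro _; right
        exact ⟨by omega, fun m hm1 hm2 hm3 => by omega⟩
      · intro _; trivial
    · have hb : (j - i == 1 || j - i == 9) = false := by simp [h1, h9]
      simp only [hb, Bool.false_eq_true, if_false]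
      by_cases hcol : (j - i) % 9 = 0
      · have hc : ((j - i) % 9 == 0) = true := by simp [hcol]
        simp only [hc, if_true, List.all_eq_true]
        constructor
        · intro hall; right
          refine ⟨hcol, fun m hm1 hm2 hm3 => ?_⟩
          exact (hact m).mp (hall m ((pvMemRange9 i j m).mpr ⟨hm1, hm2, hm3⟩))
        · rintro (hL | ⟨_, hR⟩) <;> intro k hk <;>
            obtain ⟨hk1, hk2, hk3⟩ := (pvMemRange9 i j k).mp hk
          · exact (hact k).mpr (hL k hk1 hk2)
          · exact (hact k).mpr (hR k hk1 hk2 hk3)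
      · have hc : ((j - i) % 9 == 0) = false := by simp [hcol]
        simp only [hc, Bool.false_eq_true, if_false, List.all_eq_true]
        constructor
        · intro hall; left
          intro m hm1 hm2
          exact (hact m).mp (hall m ((pvMemRange1 i j m).mpr ⟨hm1, hm2⟩))
        · rintro (hL | ⟨hc', _⟩)
          · intro p hp
            obtain ⟨hp1, hp2⟩ := (pvMemRange1 i j p).mp hp
            exact (hact p).mpr (hL p hp1 hp2)
          · omega

-- find? on a sorted list returns the least element satisfying the predicate
theorem pvFind?_sorted {p : Nat → Bool} : ∀ {l : List Nat}, l.Pairwise (· < ·) → ∀ {j : Nat},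
    (l.find? p = some j ↔ (j ∈ l ∧ p j = true ∧ ∀ x ∈ l, x < j → p x = false)) := by
  intro l
  induction l with
  | nil => intro _ j; simp
  | cons a l ih =>
    intro hs j
    have hlt : ∀ x ∈ l, a < x := (List.pairwise_cons.mp hs).1
    have hs' := (List.pairwise_cons.mp hs).2
    by_cases hpa : p a = true
    · rw [List.find?_cons_of_pos hpa]
      constructor
      · intro h
        have hj : a = j := by injection h
        subst hj
        refine ⟨List.mem_cons_self, hpa, ?_⟩
        intro x hx hxj
        rcases List.mem_cons.mp hx with rfl | hx'
        · omega
        · exact absurd (hlt x hx') (by omega)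
      · rintro ⟨hj, hpj, hmin⟩
        rcases List.mem_cons.mp hj with rfl | hj'
        · rfl
        · have haj : a < j := hlt j hj'
          have := hmin a List.mem_cons_self haj
          rw [hpa] at this; simp at this
    · rw [List.find?_cons_of_neg hpa]
      rw [ih hs']
      constructor
      · rintro ⟨hj, hpj, hmin⟩
        refine ⟨List.mem_cons_of_mem _ hj, hpj, ?_⟩
        intro x hx hxj
        rcases List.mem_cons.mp hx with rfl | hx'
        · exact Bool.eq_false_iff.mpr hpa
        · exact hmin x hx' hxj
      · rintro ⟨hj, hpj, hmin⟩
        rcases List.mem_cons.mp hj with rfl | hj'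
        · exact absurd hpj hpa
        · exact ⟨hj', hpj, fun x hx hxj => hmin x (List.mem_cons_of_mem _ hx) hxj⟩

-- findSome? over a list in which at most one element can produce a value
theorem pvFindSome?_single {α : Type} {f : Nat → Option α} {jc : Nat} :
    ∀ {l : List Nat}, (∀ x ∈ l, x ≠ jc → f x = none) →
    l.findSome? f = if jc ∈ l then f jc else none := by
  intro l
  induction l with
  | nil => intro _; simp
  | cons a l ih =>
    intro h
    by_cases ha : a = jc
    · subst ha
      rw [List.findSome?_cons]
      cases hfa : f a with
      | some v => simp [List.mem_cons]
      | none =>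
        simp only [List.mem_cons, true_or, if_true]
        rw [ih (fun x hx hne => h x (List.mem_cons_of_mem _ hx) hne)]
        by_cases hmem : a ∈ l <;> simp [hmem, hfa]
    · rw [List.findSome?_cons, h a List.mem_cons_self ha]
      rw [ih (fun x hx hne => h x (List.mem_cons_of_mem _ hx) hne)]
      by_cases hmem : jc ∈ l
      · rw [if_pos hmem, if_pos (List.mem_cons_of_mem _ hmem)]
      · rw [if_neg hmem, if_neg ?_]
        intro hc
        rcases List.mem_cons.mp hc with h' | h'
        · exact ha h'.symm
        · exact hmem h' 

-- A's pair body once the left value parsed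
theorem pvTryPair_eq (texts clicked : List String) (i : Nat) (vi : Int)
    (hvi : pvVal texts i = some vi) (j : Nat) :
    pvTryPair texts clicked i j =
      if check_nearest_index clicked i j then
        (match pvVal texts j with
         | some vj => if vi == vj || vi + vj == 10 then some [(i : Int), (j : Int)] else none
         | none => none)
      else none := by
  unfold pvTryPair
  rw [hvi]
  cases pvVal texts j with
  | none => simp
  | some vj =>
    cases hg : check_nearest_index clicked i j <;>
      cases hv : (vi == vj || vi + vj == 10) <;> simp [hv]

-- the inner scans agree: A's pair scan from cell i equals B's two-candidate check
theorem pvInner (texts clicked : List String) (i j0 : Nat) (rest' : List Nat) (vi : Int)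
    (hg : pvGood clicked (i :: j0 :: rest')) (hvi : pvVal texts i = some vi) :
    (j0 :: rest').findSome? (pvTryPair texts clicked i) =
      (match (j0 :: rest').find? (fun j => (j - i) % 9 == 0) with
       | some jc => if jc == j0 then [j0] else [j0, jc]
       | none => [j0]).findSome?
        (fun j => match pvVal texts j with
          | some vj => if vi == vj || vi + vj == 10 then some [(i : Int), (j : Int)] else none
          | none => none) := by
  obtain ⟨hp, hmem, hcomp⟩ := hg
  set g : Nat → Option (List Int) := fun j => match pvVal texts j with
    | some vj => if vi == vj || vi + vj == 10 then some [(i : Int), (j : Int)] else none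
    | none => none with hgdef
  have hA : ∀ j, pvTryPair texts clicked i j =
      if check_nearest_index clicked i j then g j else none :=
    fun j => pvTryPair_eq texts clicked i vi hvi j
  have hij0 : i < j0 := (List.pairwise_cons.mp hp).1 j0 List.mem_cons_self
  have hsorted' : (j0 :: rest').Pairwise (· < ·) := (List.pairwise_cons.mp hp).2
  have hrest : ∀ x ∈ rest', j0 < x := (List.pairwise_cons.mp hsorted').1
  have hj0len : j0 < clicked.length := (hmem j0 (by simp)).1
  have hj0act : pvAct clicked j0 = true := (hmem j0 (by simp)).2
  have hbetween : ∀ m, i < m → m < j0 → pvAct clicked m = false := by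
    intro m h1 h2
    by_contra hcon
    rw [Bool.not_eq_false] at hcon
    have hm := hcomp i List.mem_cons_self m h1 (by omega) hcon
    rcases List.mem_cons.mp hm with rfl | hm'
    · omega
    rcases List.mem_cons.mp hm' with rfl | hm''
    · omega
    · have := hrest m hm''; omega
  have hgeom0 : check_nearest_index clicked i j0 = true :=
    (pvGeom_iff clicked i j0 hij0).mpr (Or.inl hbetween)
  cases hfc : (j0 :: rest').find? (fun j => (j - i) % 9 == 0) with
  | none =>
    have hncol := List.find?_eq_none.mp hfc
    have hgnone : ∀ j ∈ rest', check_nearest_index clicked i j = false := by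
      intro j hj
      by_contra hcon
      rw [Bool.not_eq_false] at hcon
      rcases (pvGeom_iff clicked i j (by have := hrest j hj; omega)).mp hcon with hL | ⟨hc, _⟩
      · have := hL j0 hij0 (hrest j hj)
        rw [hj0act] at this; simp at this
      · exact hncol j (List.mem_cons_of_mem _ hj) (by simp [hc])
    have htail : rest'.findSome? (pvTryPair texts clicked i) = none := by
      rw [List.findSome?_eq_none_iff]
      intro j hj
      rw [hA j, hgnone j hj]
      simp
    rw [List.findSome?_cons, hA j0, if_pos hgeom0]
    cases hgj0 : g j0 with
    | some r => simp [hgj0]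
    | none => simp [htail, hgj0]
  | some jc =>
    have hchar := (pvFind?_sorted hsorted' (j := jc)).mp hfc
    by_cases hjq : jc = j0
    · subst hjq
      have hcolj0 : (jc - i) % 9 = 0 := by
        have := hchar.2.1; simpa using this
      have hgnone : ∀ j ∈ rest', check_nearest_index clicked i j = false := by
        intro j hj
        by_contra hcon
        rw [Bool.not_eq_false] at hcon
        rcases (pvGeom_iff clicked i j (by have := hrest j hj; omega)).mp hcon with hL | ⟨hc, hR⟩
        · have := hL jc hij0 (hrest j hj)
          rw [hj0act] at this; simp at this
        · have := hR jc hij0 (hrest j hj) hcolj0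
          rw [hj0act] at this; simp at this
      have htail : rest'.findSome? (pvTryPair texts clicked i) = none := by
        rw [List.findSome?_eq_none_iff]
        intro j hj
        rw [hA j, hgnone j hj]
        simp
      rw [List.findSome?_cons, hA jc, if_pos hgeom0]
      simp only [beq_self_eq_true, if_true]
      cases hgj0 : g jc with
      | some r => simp [hgj0]
      | none => simp [htail, hgj0]
    · have hj0ncol : ((j0 - i) % 9 == 0) = false := by
        by_contra h
        rw [Bool.not_eq_false] at h
        rw [List.find?_cons_of_pos (p := fun j => (j - i) % 9 == 0) h] at hfc
        injection hfc with h'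
        exact hjq h'.symm
      have hjcrest : jc ∈ rest' := by
        rcases List.mem_cons.mp hchar.1 with rfl | h'
        · exact absurd rfl hjq
        · exact h'
      have hijc : i < jc := by have := hrest jc hjcrest; omega
      have hcoljc : (jc - i) % 9 = 0 := by have := hchar.2.1; simpa using this
      have hgeomc : ∀ j ∈ rest', (check_nearest_index clicked i j = true ↔ j = jc) := by
        intro j hj
        have hij : i < j := by have := hrest j hj; omega
        constructor
        · intro hcontrue
          rcases (pvGeom_iff clicked i j hij).mp hcontrue with hL | ⟨hc, hR⟩
          · have := hL j0 hij0 (hrest j hj)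
            rw [hj0act] at this; simp at this
          · by_contra hne
            rcases Nat.lt_or_ge j jc with hlt | hge
            · have := hchar.2.2 j (List.mem_cons_of_mem _ hj) hlt
              rw [show ((j - i) % 9 == 0) = true by simp [hc]] at this
              simp at this
            · have hlt2 : jc < j := by omega
              have := hR jc hijc hlt2 hcoljc
              rw [(hmem jc (List.mem_cons_of_mem _ (List.mem_cons_of_mem _ hjcrest))).2] at this
              simp at this
        · intro hje
          subst hje
          apply (pvGeom_iff clicked i j hij).mpr
          right
          refine ⟨hcoljc, ?_⟩
          intro m h1 h2 h3
          by_contra hcon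
          rw [Bool.not_eq_false] at hcon
          have hjclen : j < clicked.length :=
            (hmem j (List.mem_cons_of_mem _ (List.mem_cons_of_mem _ hjcrest))).1
          have hm := hcomp i List.mem_cons_self m h1 (by omega) hcon
          rcases List.mem_cons.mp hm with rfl | hm'
          · omega
          rcases List.mem_cons.mp hm' with rfl | hm''
          · rw [show ((m - i) % 9 == 0) = true by simp [h3]] at hj0ncol
            simp at hj0ncol
          · have := hchar.2.2 m (List.mem_cons_of_mem _ hm'') h2
            rw [show ((m - i) % 9 == 0) = true by simp [h3]] at this
            simp at this
      have htail : rest'.findSome? (pvTryPair texts clicked i) = g jc := by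
        have hsing := pvFindSome?_single (f := pvTryPair texts clicked i) (jc := jc)
          (l := rest') ?_
        · rw [hsing, if_pos hjcrest, hA jc,
            if_pos ((hgeomc jc hjcrest).mpr rfl)]
        · intro x hx hne
          rw [hA x]
          have : check_nearest_index clicked i x = false := by
            by_contra hc
            rw [Bool.not_eq_false] at hc
            exact hne ((hgeomc x hx).mp hc)
          rw [this]; simp
      rw [List.findSome?_cons, hA j0, if_pos hgeom0]
      have hbeq : (jc == j0) = false := by simp [hjq]
      simp only [hbeq, Bool.false_eq_true, if_false]
      cases hgj0 : g j0 with
      | some r => simp [hgj0]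
      | none =>
        rw [htail]
        cases hgc : g jc <;> simp [hgj0, hgc]

-- the two loops agree on every good suffix
theorem pvLoop_eq (texts clicked : List String) :
    ∀ l, pvGood clicked l → pvLoopA texts clicked l = pvLoopB texts clicked l := by
  intro l
  induction l with
  | nil => intro _; rfl
  | cons i rest ih =>
    intro hg
    cases rest with
    | nil => rfl
    | cons j0 rest' =>
      have hg' := pvGood_tail clicked i (j0 :: rest') hg
      cases hvi : pvVal texts i with
      | none =>
        have hnone : (j0 :: rest').findSome? (pvTryPair texts clicked i) = none := by
          rw [List.findSome?_eq_none_iff]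
          intro j hj
          simp [pvTryPair, hvi]
        simp only [pvLoopA, pvLoopB, hvi, hnone]
        exact ih hg'
      | some vi =>
        have hin := pvInner texts clicked i j0 rest' vi hg hvi
        simp only [pvLoopA, pvLoopB, hvi]
        rw [hin]
        cases (match (j0 :: rest').find? (fun j => (j - i) % 9 == 0) with
               | some jc => if jc == j0 then [j0] else [j0, jc]
               | none => [j0]).findSome?
            (fun j => match pvVal texts j with
              | some vj => if vi == vj || vi + vj == 10 then some [(i : Int), (j : Int)] else none
              | none => none) with
        | some r => rfl
        | none => exact ih hg'

-- ===== VERDICT (by name: the statement is the Claim_ definition above) =====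
theorem find_removable_pair_spec : Claim_equal_find_removable_pair := by
  intro texts clicked _
  unfold Spec_find_removable_pair find_removable_pair find_removable_pair_alt
  exact pvLoop_eq texts clicked _ (pvGood_active clicked)
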